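-- pv_equiv track=rewrite | github.com/wjswk28/gaja_vacation_system | app/schedule/utils.py | find_name_index
-- ===== SOURCE A (Python) =====
-- def find_name_index(name, name_list):
--     """
--     부분 일치 + 앞글자 유사도 기반으로 직원 index 찾기
--     이름이 '홍길동'인데 리스트에 '길동'만 있어도 매칭
--     이름이 '홍길동'인데 리스트에 '홍'만 있어도 매칭
--     """
--
--     # 1) 완전 일치 우선
--     for i, n in enumerate(name_list):
--         if name == n:
--             return i
--
--     # 2) 부분 포함 매칭
--     for i, n in enumerate(name_list):
--         if name in n or n in name:
--             return i
--
--     # 3) 첫 글자 같으면 가중치 매칭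
--     for i, n in enumerate(name_list):
--         if n[0] == name[0]:
--             return i
--
--     return None
-- ===== SOURCE B (Python) =====
-- def find_name_index(name, name_list):
--     """Single pass: return exact match immediately; otherwise remember the
--     first partial match and the first first-char match and pick afterwards."""
--     first_partial = None
--     first_firstchar = None
--     for i, n in enumerate(name_list):
--         if name == n:
--             return i
--         elif (name in n or n in name) and first_partial is None:
--             first_partial = i
--         elif n and name and n[0] == name[0] and first_firstchar is None:
--             first_firstchar = i
--     if first_partial is not None:
--         return first_partial
--     return first_firstchar
-- ===== Notes on version B (the rewrite author's own statement) =====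
-- stated objective: alternative
-- what changed: Replaced A's three separate scans of name_list (exact, then partial, then first-char) by one pass that returns immediately on an exact match and otherwise remembers the first partial-match index and the first first-char-match index.
import Mathlib
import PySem

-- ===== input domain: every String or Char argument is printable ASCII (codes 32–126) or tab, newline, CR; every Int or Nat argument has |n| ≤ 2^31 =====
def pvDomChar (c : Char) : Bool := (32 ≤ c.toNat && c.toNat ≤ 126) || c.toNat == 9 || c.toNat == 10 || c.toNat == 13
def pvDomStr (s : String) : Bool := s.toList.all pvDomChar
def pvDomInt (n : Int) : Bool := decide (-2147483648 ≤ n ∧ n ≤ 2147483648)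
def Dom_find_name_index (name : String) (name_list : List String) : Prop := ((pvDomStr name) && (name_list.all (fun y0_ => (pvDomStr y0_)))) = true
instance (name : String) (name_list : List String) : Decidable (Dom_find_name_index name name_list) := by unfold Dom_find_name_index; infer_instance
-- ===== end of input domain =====

-- B changes A's three scans into one pass keeping two saved indices; same return value.

-- ===== PORT A =====
-- loop 1: for i, n in enumerate(name_list): if name == n: return i
def fniExact (name : String) (l : List String) (i : Int) : Option Int :=
  match l with
  | [] => none
  | n :: t => if name == n then some i else fniExact name t (i + 1)

-- loop 2: if name in n or n in name: return i
def fniPartial (name : String) (l : List String) (i : Int) : Option Int :=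
  match l with
  | [] => none
  | n :: t =>
    if PySem.Str.isIn name n || PySem.Str.isIn n name then some i
    else fniPartial name t (i + 1)

-- loop 3: if n[0] == name[0]: return i  (n[0] via pyGet?; the loop is only
-- reached when name and every n are nonempty, so Python never raises here)
def fniFirst (name : String) (l : List String) (i : Int) : Option Int :=
  match l with
  | [] => none
  | n :: t =>
    if PySem.Str.pyGet? n 0 == PySem.Str.pyGet? name 0 then some i
    else fniFirst name t (i + 1)

def find_name_index (name : String) (name_list : List String) : Option Int :=
  match fniExact name name_list 0 with
  | some i => some i
  | none =>
    match fniPartial name name_list 0 with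
    | some i => some i
    | none => fniFirst name name_list 0

-- ===== PORT B =====
-- single pass; fp = first_partial, ffc = first_firstchar
def fniLoop (name : String) (l : List String) (i : Int) (fp ffc : Option Int) : Option Int :=
  match l with
  | [] => match fp with | some j => some j | none => ffc
  | n :: t =>
    if name == n then some i
    else if (PySem.Str.isIn name n || PySem.Str.isIn n name) && fp.isNone then
      fniLoop name t (i + 1) (some i) ffc
    else if (n != "") && (name != "") && (PySem.Str.pyGet? n 0 == PySem.Str.pyGet? name 0) && ffc.isNone then
      fniLoop name t (i + 1) fp (some i)
    else fniLoop name t (i + 1) fp ffc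

def find_name_index_alt (name : String) (name_list : List String) : Option Int :=
  fniLoop name name_list 0 none none

-- ===== PRECONDITION & SPEC =====
def Spec_find_name_index (name : String) (name_list : List String) (out : Option Int) : Prop := out = find_name_index_alt name name_list
instance (name : String) (name_list : List String) (out : Option Int) : Decidable (Spec_find_name_index name name_list out) := by unfold Spec_find_name_index; infer_instance

-- ===== CLAIM (what is proved, stated in full; the proofs are below) =====
def Claim_equal_find_name_index : Prop := ∀ (name : String) (name_list : List String), Dom_find_name_index name name_list → Spec_find_name_index name name_list (find_name_index name name_list)

-- ===== LEMMAS AND PROOFS =====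

def pvOr (a b : Option Int) : Option Int := match a with | some x => some x | none => b


-- the single pass equals A's three scans combined, for any saved state
lemma fniLoop_eq (name : String) :
    ∀ (l : List String) (i : Int) (fp ffc : Option Int),
      fniLoop name l i fp ffc =
        pvOr (fniExact name l i)
          (pvOr fp (pvOr (fniPartial name l i) (pvOr ffc (fniFirst name l i)))) := by
  intro l
  induction l with
  | nil => intro i fp ffc; cases fp <;> cases ffc <;> rfl
  | cons n t ih =>
    intro i fp ffc
    by_cases hx : name == n
    · simp [fniLoop, fniExact, hx, pvOr]
    · have hx' : (name == n) = false := by simp_all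
      by_cases hp : (PySem.Str.isIn name n || PySem.Str.isIn n name) = true
      · -- head is a partial match
        cases fp with
        | none =>
          simp only [fniLoop, fniExact, fniPartial, hx', hp, Option.isNone_none,
            Bool.and_true, if_false, if_true, ih]
          cases fniExact name t (i + 1) <;> simp [pvOr]
        | some j =>
          -- partial branch is off (fp set); head's first-char check may fire but is shadowed
          simp only [fniLoop, hx', hp, Option.isNone_some, Bool.and_false,
            Bool.false_eq_true, if_false]
          split <;> rw [ih] <;> cases h : fniExact name t (i + 1) <;>
            simp [pvOr, fniExact, hx', hp, h]
      · -- head is not a partial match; in particular name ≠ "" and n ≠ ""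
        have hp' : (PySem.Str.isIn name n || PySem.Str.isIn n name) = false := by simp_all
        have hpc : PySem.Chars.isIn name.toList n.toList = false ∧
            PySem.Chars.isIn n.toList name.toList = false := by
          simpa using hp'
        have hnn : n.toList ≠ [] := by
          intro h
          have : PySem.Chars.isIn n.toList name.toList = true := by
            rw [h]; exact PySem.Chars.isIn_nil _
          rw [hpc.2] at this; exact Bool.false_ne_true this
        have hnm : name.toList ≠ [] := by
          intro h
          have : PySem.Chars.isIn name.toList n.toList = true := by
            rw [h]; exact PySem.Chars.isIn_nil _
          rw [hpc.1] at this; exact Bool.false_ne_true this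
        have hne : (n != "") = true := by
          simp only [bne_iff_ne, ne_eq]; intro h; exact hnn (by simp [h])
        have hme : (name != "") = true := by
          simp only [bne_iff_ne, ne_eq]; intro h; exact hnm (by simp [h])
        by_cases hf : (PySem.Str.pyGet? n 0 == PySem.Str.pyGet? name 0) = true
        · cases ffc with
          | none =>
            simp only [fniLoop, fniExact, fniPartial, fniFirst, hx', hp', hf, hne, hme,
              Option.isNone_none, Bool.and_true, Bool.true_and, if_false, if_true, ih]
            cases fniExact name t (i + 1) <;> cases fp <;>
              cases fniPartial name t (i + 1) <;> simp [pvOr]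
          | some j =>
            simp only [fniLoop, fniExact, fniPartial, fniFirst, hx', hp', hf, hne, hme,
              Option.isNone_some, Bool.and_false, if_false, if_true, ih]
            cases fniExact name t (i + 1) <;> cases fp <;>
              cases fniPartial name t (i + 1) <;> simp [pvOr]
        · have hf' : (PySem.Str.pyGet? n 0 == PySem.Str.pyGet? name 0) = false := by simp_all
          simp only [fniLoop, fniExact, fniPartial, fniFirst, hx', hp', hf',
            Bool.and_false, Bool.false_and, if_false, ih]
          cases fniExact name t (i + 1) <;> cases fp <;>
            cases fniPartial name t (i + 1) <;> cases ffc <;> simp [pvOr]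

-- ===== VERDICT (by name: the statement is the Claim_ definition above) =====
theorem find_name_index_spec : Claim_equal_find_name_index := by
  intro name name_list _
  unfold Spec_find_name_index find_name_index find_name_index_alt
  rw [fniLoop_eq]
  cases fniExact name name_list 0 <;> cases fniPartial name name_list 0 <;> simp [pvOr]
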